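-- pv_equiv track=rewrite | github.com/mathelehrer/BlenderMathAnim | objects/tex_bobject.py | add_non_overlapping_substrings
-- ===== SOURCE A (Python) =====
-- from copy import deepcopy
--
-- def add_non_overlapping_substrings(combo_in_progress, combos, substrings):
--     if len(combo_in_progress) > 0:
--         # Start checking substrings with the one after the last one added.
--         starting_index = substrings.index(combo_in_progress[-1]) + 1
--         # starting_index = 0
--     else:
--         starting_index = 0
--
--     for i in range(starting_index, len(substrings)):
--         # check if substring works
--         candidate = substrings[i]
--         no_overlap = True
--         # check if substring overlaps with any substring alredy
--         # in combo_in_progress. If so, don't add it to combos.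
--         for sub in combo_in_progress:
--             # E.g., sub = [0, 0, 1] and candidate = [3, 0, 1] overlap
--             no_overlap_in_1 = candidate[0] >= sub[0] + sub[2] or \
--                               candidate[0] + candidate[2] <= sub[0]
--             no_overlap_in_2 = candidate[1] >= sub[1] + sub[2] or \
--                               candidate[1] + candidate[2] <= sub[1]
--
--             no_overlap = (no_overlap_in_1 and no_overlap_in_2)
--
--             if not no_overlap:
--                 break
--
--         if no_overlap:
--             new_combo = deepcopy(combo_in_progress)
--             new_combo.append(candidate)
--             combos.append(new_combo)
--             combos = add_non_overlapping_substrings(new_combo, combos, substrings)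
--
--     return combos
-- ===== SOURCE B (Python) =====
-- def _no_overlap(cand, sub):
--     return (cand[0] >= sub[0] + sub[2] or cand[0] + cand[2] <= sub[0]) and \
--            (cand[1] >= sub[1] + sub[2] or cand[1] + cand[2] <= sub[1])
--
--
-- def _children(combo, substrings):
--     # Candidates after the last one added (first occurrence, like list.index).
--     start = substrings.index(combo[-1]) + 1 if combo else 0
--     return [combo + [cand] for cand in substrings[start:]
--             if all(_no_overlap(cand, sub) for sub in combo)]
--
--
-- def add_non_overlapping_substrings(combo_in_progress, combos, substrings):
--     # Iterative preorder DFS with an explicit stack instead of recursion.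
--     stack = _children(combo_in_progress, substrings)[::-1]
--     while stack:
--         combo = stack.pop()
--         combos.append(combo)
--         stack.extend(_children(combo, substrings)[::-1])
--     return combos
-- ===== Notes on version B (the rewrite author's own statement) =====
-- stated objective: alternative
-- what changed: Replaced A's recursive DFS (which threads the growing combos accumulator through recursive calls nested inside the candidate loop) by an iterative preorder DFS over an explicit stack: a _children helper builds each node's valid extensions in one comprehension, children are pushed in reverse so pops come in ascending candidate order, and each combo is appended to combos when it is popped, reproducing A's output order exactly.
-- outside the precondition, e.g. on add_non_overlapping_substrings([[0, -8412, 7], [], []], [], [[], [3, 1416, -2]]): A returns [], B returns []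
import Mathlib
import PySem

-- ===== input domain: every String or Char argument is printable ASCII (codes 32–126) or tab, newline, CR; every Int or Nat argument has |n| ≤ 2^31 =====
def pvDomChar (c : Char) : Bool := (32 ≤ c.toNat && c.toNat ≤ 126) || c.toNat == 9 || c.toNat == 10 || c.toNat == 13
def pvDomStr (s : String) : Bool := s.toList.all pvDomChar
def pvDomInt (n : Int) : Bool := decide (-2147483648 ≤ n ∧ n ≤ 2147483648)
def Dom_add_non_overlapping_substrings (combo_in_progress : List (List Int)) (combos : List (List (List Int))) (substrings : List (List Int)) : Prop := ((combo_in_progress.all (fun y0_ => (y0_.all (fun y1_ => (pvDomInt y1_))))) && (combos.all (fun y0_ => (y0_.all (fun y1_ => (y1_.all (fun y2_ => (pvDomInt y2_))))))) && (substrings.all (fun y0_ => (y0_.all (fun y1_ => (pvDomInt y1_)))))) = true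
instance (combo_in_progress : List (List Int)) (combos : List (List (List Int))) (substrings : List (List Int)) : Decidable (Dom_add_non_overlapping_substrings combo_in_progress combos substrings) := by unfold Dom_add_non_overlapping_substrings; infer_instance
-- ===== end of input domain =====

-- B replaces A's recursive DFS by an iterative preorder DFS over an explicit stack
-- (same output, including order); both Pythons mutate `combos` in place, the
-- equivalence proved here is about the returned value.

-- ===== PORT A =====
-- 'substrings.index(combo_in_progress[-1]) + 1 if combo else 0': both Pythons
-- compute this expression verbatim.  The getD fallback is reached only when the
-- last element is missing from substrings (Python raises ValueError there;
-- excluded by Pre_).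
def pyStartIndex (combo : List (List Int)) (substrings : List (List Int)) : Nat :=
  match combo.getLast? with
  | none => 0
  | some l => (PySem.List.index? substrings l).getD substrings.length + 1

-- the two-axis interval test of A's inner loop body (getD 0: Python raises
-- IndexError on lists shorter than 3; excluded by Pre_)
def noOverlapA (cand sub : List Int) : Bool :=
  (decide (cand.getD 0 0 ≥ sub.getD 0 0 + sub.getD 2 0) || decide (cand.getD 0 0 + cand.getD 2 0 ≤ sub.getD 0 0))
  && (decide (cand.getD 1 0 ≥ sub.getD 1 0 + sub.getD 2 0) || decide (cand.getD 1 0 + cand.getD 2 0 ≤ sub.getD 1 0))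

-- A's 'for sub in combo_in_progress: … if not no_overlap: break'
def checkA (cand : List Int) : List (List Int) → Bool
  | [] => true
  | sub :: rest => if noOverlapA cand sub then checkA cand rest else false

-- range(s, len(substrings)) as a list of Nat indices (all in range)
def idxList (s : Nat) (substrings : List (List Int)) : List Nat :=
  List.range' s (substrings.length - s)

-- A's 'for i in range(starting_index, len(substrings))' with the recursive call
-- inlined; fuel bounds the recursion DEPTH (substrings.length + 1 suffices
-- under Pre_, proved below).
def loopA (substrings : List (List Int)) : Nat → List (List Int) → List (List (List Int)) → List Nat → List (List (List Int))
  | _, _, combos, [] => combos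
  | f, cip, combos, i :: rest =>
    let cand := substrings.getD i []
    if checkA cand cip then
      let nc := cip ++ [cand]
      let inner :=
        match f with
        | 0 => combos ++ [nc]
        | f' + 1 => loopA substrings f' nc (combos ++ [nc]) (idxList (pyStartIndex nc substrings) substrings)
      loopA substrings f cip inner rest
    else
      loopA substrings f cip combos rest
termination_by f _ _ idxs => (f, idxs.length)

def add_non_overlapping_substrings (combo_in_progress : List (List Int)) (combos : List (List (List Int))) (substrings : List (List Int)) : List (List (List Int)) :=
  loopA substrings (substrings.length + 1) combo_in_progress combos
    (idxList (pyStartIndex combo_in_progress substrings) substrings)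

-- ===== PORT B =====
-- Source B's _no_overlap
def noOverlapB (cand sub : List Int) : Bool :=
  (decide (cand.getD 0 0 ≥ sub.getD 0 0 + sub.getD 2 0) || decide (cand.getD 0 0 + cand.getD 2 0 ≤ sub.getD 0 0))
  && (decide (cand.getD 1 0 ≥ sub.getD 1 0 + sub.getD 2 0) || decide (cand.getD 1 0 + cand.getD 2 0 ≤ sub.getD 1 0))

-- Source B's _children: slice substrings[start:], keep the non-overlapping
-- candidates, extend the combo by each
def childrenB (combo : List (List Int)) (substrings : List (List Int)) : List (List (List Int)) :=
  ((substrings.drop (pyStartIndex combo substrings)).filter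
      (fun cand => combo.all (fun sub => noOverlapB cand sub))).map
    (fun cand => combo ++ [cand])

-- Source B's while-loop; the stack is modeled top-first, so Python's
-- 'extend with reversed children, pop from the end' is 'children ++ rest'.
-- Fuel bounds the number of pops (= number of emitted combos);
-- (substrings.length + 1)^(substrings.length + 2) suffices under Pre_
-- (proved below).
def goB (substrings : List (List Int)) : Nat → List (List (List Int)) → List (List (List Int)) → List (List (List Int))
  | 0, _, combos => combos
  | _ + 1, [], combos => combos
  | f + 1, c :: rest, combos => goB substrings f (childrenB c substrings ++ rest) (combos ++ [c])
termination_by f _ _ => f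

def add_non_overlapping_substrings_alt (combo_in_progress : List (List Int)) (combos : List (List (List Int))) (substrings : List (List Int)) : List (List (List Int)) :=
  goB substrings ((substrings.length + 1) ^ (substrings.length + 2)) (childrenB combo_in_progress substrings) combos

-- ===== PRECONDITION & SPEC =====
-- Pre_ excludes only inputs on which the Python A does not return a value: a
-- nonempty combo_in_progress whose last element is missing from substrings
-- (ValueError); inner lists shorter than 3 that the interval test dereferences
-- (IndexError — the shape disjunction below is a closed-form
-- under-approximation, so a few short-list inputs on which A's short-circuit
-- happens to dodge every bad dereference are excluded although A returns, see
-- cites); and substring lists that are neither duplicate-free nor made of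
-- entries with positive third component, on which A's first-occurrence
-- list.index can rescan a self-non-overlapping entry and recurse without bound
-- (RecursionError — again an under-approximation, see cites; ordinary
-- duplicates with positive third components are admitted and matched).
def Pre_add_non_overlapping_substrings (combo_in_progress : List (List Int)) (combos : List (List (List Int))) (substrings : List (List Int)) : Prop :=
  (substrings.Nodup ∨ ∀ l ∈ substrings, 0 < l.getD 2 0) ∧
  (∀ l ∈ combo_in_progress.getLast?.toList, l ∈ substrings) ∧
  (((∀ l ∈ substrings, 3 ≤ l.length) ∧ (∀ l ∈ combo_in_progress, 3 ≤ l.length)) ∨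
    (combo_in_progress = [] ∧ substrings.length ≤ 1) ∨
    (∃ l, combo_in_progress.getLast? = some l ∧ substrings.idxOf l + 1 = substrings.length))
instance (combo_in_progress : List (List Int)) (combos : List (List (List Int))) (substrings : List (List Int)) : Decidable (Pre_add_non_overlapping_substrings combo_in_progress combos substrings) := by unfold Pre_add_non_overlapping_substrings; infer_instance

def pvWitness_add_non_overlapping_substrings : List (List Int) × List (List (List Int)) × List (List Int) :=
  ([], [], [[0, 0, 1], [0, 0, 1], [2, 0, 1]])

def Spec_add_non_overlapping_substrings (combo_in_progress : List (List Int)) (combos : List (List (List Int))) (substrings : List (List Int)) (out : List (List (List Int))) : Prop := out = add_non_overlapping_substrings_alt combo_in_progress combos substrings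
instance (combo_in_progress : List (List Int)) (combos : List (List (List Int))) (substrings : List (List Int)) (out : List (List (List Int))) : Decidable (Spec_add_non_overlapping_substrings combo_in_progress combos substrings out) := by unfold Spec_add_non_overlapping_substrings; infer_instance

-- ===== CLAIM (what is proved, stated in full; the proofs are below) =====
def Claim_equal_add_non_overlapping_substrings : Prop := ∀ (combo_in_progress : List (List Int)) (combos : List (List (List Int))) (substrings : List (List Int)), Dom_add_non_overlapping_substrings combo_in_progress combos substrings → Pre_add_non_overlapping_substrings combo_in_progress combos substrings → Spec_add_non_overlapping_substrings combo_in_progress combos substrings (add_non_overlapping_substrings combo_in_progress combos substrings)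

-- ===== LEMMAS AND PROOFS =====

-- preorder forest of descendants, fuel-indexed
def preA (substrings : List (List Int)) : Nat → List (List Int) → List (List (List Int))
  | 0, cip => childrenB cip substrings
  | f + 1, cip => (childrenB cip substrings).flatMap (fun ch => ch :: preA substrings f ch)

def preTail (substrings : List (List Int)) : Nat → List (List Int) → List (List (List Int))
  | 0, _ => []
  | f + 1, ch => preA substrings f ch

def Pfun (substrings : List (List Int)) (c : List (List Int)) : List (List (List Int)) :=
  c :: preA substrings substrings.length c

theorem checkA_eq_all (cand : List Int) (cip : List (List Int)) :
    checkA cand cip = cip.all (fun sub => noOverlapB cand sub) := by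
  induction cip with
  | nil => rfl
  | cons sub rest ih =>
    simp only [checkA, List.all_cons]
    by_cases h : noOverlapA cand sub
    · have h' : noOverlapB cand sub = true := h
      simp [h, h', ih]
    · have h' : noOverlapB cand sub = false := by simpa using h
      simp [h, h']

theorem drop_eq_map_idxList (xs : List (List Int)) (s : Nat) :
    xs.drop s = (idxList s xs).map (fun i => xs.getD i []) := by
  apply List.ext_getElem
  · simp [idxList]
  · intro i h1 h2
    simp only [idxList, List.getElem_map] at h2 ⊢
    have hi : i < xs.length - s := by simpa [idxList] using h2
    rw [List.getElem_drop]
    rw [List.getElem_range'_1 i (by simpa using hi)]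
    rw [List.getD_eq_getElem _ _ (by omega)]

theorem childrenB_eq (cip substrings : List (List Int)) :
    childrenB cip substrings
      = ((idxList (pyStartIndex cip substrings) substrings).filter
            (fun i => checkA (substrings.getD i []) cip)).map
          (fun i => cip ++ [substrings.getD i []]) := by
  unfold childrenB
  rw [drop_eq_map_idxList, List.filter_map, List.map_map]
  simp [Function.comp_def, checkA_eq_all]

theorem preA_eq_flatMap (substrings : List (List Int)) (f : Nat) (cip : List (List Int)) :
    preA substrings f cip
      = (childrenB cip substrings).flatMap (fun ch => ch :: preTail substrings f ch) := by
  cases f with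
  | zero => simp [preA, preTail, List.flatMap_singleton']
  | succ f' => rfl

theorem loopA_eq (substrings : List (List Int)) :
    ∀ (f : Nat) (idxs : List Nat) (cip : List (List Int)) (combos : List (List (List Int))),
      loopA substrings f cip combos idxs
        = combos ++ ((idxs.filter (fun i => checkA (substrings.getD i []) cip)).map
              (fun i => cip ++ [substrings.getD i []])).flatMap
            (fun ch => ch :: preTail substrings f ch) := by
  intro f
  induction f with
  | zero =>
    intro idxs
    induction idxs with
    | nil => intro cip combos; simp [loopA]
    | cons i rest ih =>
      intro cip combos
      by_cases h : checkA (substrings.getD i []) cip = true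
      · simp only [loopA, h, if_pos]
        rw [ih]
        have h2 : checkA (substrings[i]?.getD []) cip = true := h
        simp [h2, preTail]
      · simp only [loopA, h, if_neg, Bool.false_eq_true, not_false_iff]
        rw [ih]
        have h2 : ¬ checkA (substrings[i]?.getD []) cip = true := h
        simp [h2]
  | succ f' ihf =>
    intro idxs
    induction idxs with
    | nil => intro cip combos; simp [loopA]
    | cons i rest ih =>
      intro cip combos
      by_cases h : checkA (substrings.getD i []) cip = true
      · simp only [loopA, h, if_pos]
        rw [ihf, ← childrenB_eq, ← preA_eq_flatMap, ih]
        have h2 : checkA (substrings[i]?.getD []) cip = true := h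
        simp [h2, preTail]
      · simp only [loopA, h, if_neg, Bool.false_eq_true, not_false_iff]
        rw [ih]
        have h2 : ¬ checkA (substrings[i]?.getD []) cip = true := h
        simp [h2]

theorem preA_nil (c substrings : List (List Int)) (h : childrenB c substrings = [])
    (f : Nat) : preA substrings f c = [] := by
  cases f <;> simp [preA, h]

-- membership structure of childrenB
theorem mem_childrenB (c substrings : List (List Int)) (ch : List (List Int))
    (hch : ch ∈ childrenB c substrings) :
    ∃ cand, cand ∈ substrings.drop (pyStartIndex c substrings) ∧
      c.all (fun sub => noOverlapB cand sub) = true ∧ ch = c ++ [cand] := by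
  unfold childrenB at hch
  simp only [List.mem_map, List.mem_filter] at hch
  obtain ⟨cand, ⟨hdrop, hall⟩, rfl⟩ := hch
  exact ⟨cand, hdrop, hall, rfl⟩

theorem childrenB_length_le (c substrings : List (List Int)) :
    (childrenB c substrings).length ≤ substrings.length := by
  unfold childrenB
  rw [List.length_map]
  exact le_trans (List.length_filter_le _ _)
    (le_trans (le_of_eq (List.length_drop ..)) (Nat.sub_le _ _))

-- abstract termination measure machinery: μ strictly decreases to children
theorem childrenB_nil_of_mu_zero (substrings : List (List Int))
    (μ : List (List Int) → Nat)
    (hμ : ∀ c ch, ch ∈ childrenB c substrings → μ ch < μ c)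
    (c : List (List Int)) (h : μ c = 0) : childrenB c substrings = [] := by
  apply List.eq_nil_iff_forall_not_mem.mpr
  intro ch hch
  have := hμ c ch hch
  omega

theorem preA_stable_mu (substrings : List (List Int))
    (μ : List (List Int) → Nat)
    (hμ : ∀ c ch, ch ∈ childrenB c substrings → μ ch < μ c) :
    ∀ (n : Nat) (c : List (List Int)) (f g : Nat),
      μ c ≤ n → n ≤ f → n ≤ g → preA substrings f c = preA substrings g c := by
  intro n
  induction n with
  | zero =>
    intro c f g h _ _
    have hc := childrenB_nil_of_mu_zero substrings μ hμ c (by omega)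
    rw [preA_nil c substrings hc f, preA_nil c substrings hc g]
  | succ n ih =>
    intro c f g hle hf hg
    by_cases hz : μ c = 0
    · have hc := childrenB_nil_of_mu_zero substrings μ hμ c hz
      rw [preA_nil c substrings hc f, preA_nil c substrings hc g]
    · obtain ⟨f', rfl⟩ : ∃ f', f = f' + 1 := ⟨f - 1, by omega⟩
      obtain ⟨g', rfl⟩ : ∃ g', g = g' + 1 := ⟨g - 1, by omega⟩
      simp only [preA]
      apply List.flatMap_congr
      intro ch hch
      have hst := hμ c ch hch
      rw [ih ch f' g' (by omega) (by omega) (by omega)]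

theorem Pfun_fix_mu (substrings : List (List Int))
    (μ : List (List Int) → Nat)
    (hμ : ∀ c ch, ch ∈ childrenB c substrings → μ ch < μ c)
    (hbd : ∀ c, μ c ≤ substrings.length)
    (c : List (List Int)) :
    Pfun substrings c = c :: (childrenB c substrings).flatMap (Pfun substrings) := by
  unfold Pfun
  cases hL : substrings.length with
  | zero =>
    have hc := childrenB_nil_of_mu_zero substrings μ hμ c (by have := hbd c; omega)
    simp [preA_nil c substrings hc, hc]
  | succ m =>
    have h1 : preA substrings (m + 1) c
        = (childrenB c substrings).flatMap (fun ch => ch :: preA substrings m ch) := rfl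
    rw [h1]
    congr 1
    apply List.flatMap_congr
    intro ch hch
    have hst := hμ c ch hch
    have hb := hbd c
    rw [preA_stable_mu substrings μ hμ (μ ch) ch m (m + 1) (le_refl _) (by omega) (by omega)]

theorem Pfun_len_mu (substrings : List (List Int))
    (μ : List (List Int) → Nat)
    (hμ : ∀ c ch, ch ∈ childrenB c substrings → μ ch < μ c)
    (hbd : ∀ c, μ c ≤ substrings.length) :
    ∀ (k : Nat) (c : List (List Int)), μ c ≤ k →
      (Pfun substrings c).length ≤ (substrings.length + 1) ^ (k + 1) := by
  intro k
  induction k with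
  | zero =>
    intro c h
    have hc := childrenB_nil_of_mu_zero substrings μ hμ c (by omega)
    rw [Pfun_fix_mu substrings μ hμ hbd c, hc]
    simp
  | succ k ih =>
    intro c h
    rw [Pfun_fix_mu substrings μ hμ hbd c]
    have hcl : (childrenB c substrings).length ≤ substrings.length :=
      childrenB_length_le c substrings
    have hsum : ((childrenB c substrings).flatMap (Pfun substrings)).length
        ≤ (childrenB c substrings).length * (substrings.length + 1) ^ (k + 1) := by
      rw [List.length_flatMap]
      have := List.sum_le_card_nsmul
        ((childrenB c substrings).map (fun ch => (Pfun substrings ch).length))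
        ((substrings.length + 1) ^ (k + 1)) ?_
      · simpa using this
      · intro x hx
        obtain ⟨ch, hch, rfl⟩ := List.mem_map.mp hx
        have hst := hμ c ch hch
        exact ih ch (by omega)
    have hpos : 0 < (substrings.length + 1) ^ (k + 1) := Nat.pow_pos (by omega)
    have hstep : (substrings.length + 1) ^ (k + 2)
        = (substrings.length + 1) * (substrings.length + 1) ^ (k + 1) := by ring
    simp only [List.length_cons]
    rw [hstep]
    nlinarith

theorem goB_eq_mu (substrings : List (List Int))
    (μ : List (List Int) → Nat)
    (hμ : ∀ c ch, ch ∈ childrenB c substrings → μ ch < μ c)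
    (hbd : ∀ c, μ c ≤ substrings.length) :
    ∀ (f : Nat) (stack : List (List (List Int))) (combos : List (List (List Int))),
      (stack.flatMap (Pfun substrings)).length ≤ f →
      goB substrings f stack combos = combos ++ stack.flatMap (Pfun substrings) := by
  intro f
  induction f with
  | zero =>
    intro stack combos h
    cases stack with
    | nil => simp [goB]
    | cons c rest =>
      exfalso
      rw [List.flatMap_cons, Pfun_fix_mu substrings μ hμ hbd c] at h
      simp at h
  | succ f ih =>
    intro stack combos h
    cases stack with
    | nil => simp [goB]
    | cons c rest =>
      simp only [goB]
      have hfix := Pfun_fix_mu substrings μ hμ hbd c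
      have h1 : ((c :: rest).flatMap (Pfun substrings)).length
          = (((childrenB c substrings) ++ rest).flatMap (Pfun substrings)).length + 1 := by
        rw [List.flatMap_cons, List.flatMap_append, hfix]
        simp
      rw [ih _ _ (by omega)]
      rw [List.flatMap_cons, List.flatMap_append, hfix]
      simp

-- the Nodup measure: start indices strictly increase along children
theorem children_start (substrings : List (List Int)) (hnd : substrings.Nodup)
    (c : List (List Int)) :
    ∀ ch ∈ childrenB c substrings,
      pyStartIndex c substrings + 1 ≤ pyStartIndex ch substrings := by
  intro ch hch
  obtain ⟨cand, hdrop, -, rfl⟩ := mem_childrenB c substrings ch hch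
  obtain ⟨k, hk, hgetk⟩ := List.mem_iff_getElem.mp hdrop
  have hlen : pyStartIndex c substrings + k < substrings.length := by
    simp only [List.length_drop] at hk; omega
  have hcand : substrings[pyStartIndex c substrings + k]'hlen = cand := by
    rw [← List.getElem_drop]; exact hgetk
  have hmem : cand ∈ substrings := List.mem_of_mem_drop hdrop
  obtain ⟨j, hj⟩ := Option.isSome_iff_exists.mp
    ((PySem.List.index?_isSome_iff substrings cand).mpr hmem)
  obtain ⟨hjlt, hjv, -⟩ := PySem.List.getElem_of_index?_eq_some hj
  have hje : j = pyStartIndex c substrings + k :=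
    (List.Nodup.getElem_inj_iff hnd).mp (by rw [hjv, hcand])
  have hchild : pyStartIndex (c ++ [cand]) substrings = j + 1 := by
    simp only [pyStartIndex, List.getLast?_concat, hj, Option.getD_some]
  rw [hchild]
  omega

theorem start_lt_of_children_ne (c substrings : List (List Int))
    (ch : List (List Int)) (hch : ch ∈ childrenB c substrings) :
    pyStartIndex c substrings < substrings.length := by
  obtain ⟨cand, hdrop, -, -⟩ := mem_childrenB c substrings ch hch
  by_contra h
  rw [List.drop_eq_nil_of_le (by omega)] at hdrop
  simp at hdrop

-- the positivity measure: a candidate never repeats an element of the combo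
theorem noOverlapB_self_false (cand : List Int) (h : 0 < cand.getD 2 0) :
    noOverlapB cand cand = false := by
  simp only [noOverlapB, Bool.and_eq_false_iff, Bool.or_eq_false_iff,
    decide_eq_false_iff_not, not_le]
  left
  constructor <;> omega

theorem cand_not_mem (substrings : List (List Int))
    (hpos : ∀ l ∈ substrings, 0 < l.getD 2 0)
    (c : List (List Int)) (cand : List Int) (hmem : cand ∈ substrings)
    (hall : c.all (fun sub => noOverlapB cand sub) = true) : cand ∉ c := by
  intro hc
  have h1 := List.all_eq_true.mp hall cand hc
  rw [noOverlapB_self_false cand (hpos cand hmem)] at h1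
  exact absurd h1 (by simp)

def muPos (substrings : List (List Int)) (c : List (List Int)) : Nat :=
  (substrings.dedup.filter (fun l => decide (l ∉ c))).length

theorem muPos_lt (substrings : List (List Int))
    (hpos : ∀ l ∈ substrings, 0 < l.getD 2 0) :
    ∀ c ch, ch ∈ childrenB c substrings → muPos substrings ch < muPos substrings c := by
  intro c ch hch
  obtain ⟨cand, hdrop, hall, rfl⟩ := mem_childrenB c substrings ch hch
  have hmem : cand ∈ substrings := List.mem_of_mem_drop hdrop
  have hnot : cand ∉ c := cand_not_mem substrings hpos c cand hmem hall
  unfold muPos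
  have hsplit : (substrings.dedup.filter (fun l => decide (l ∉ c ++ [cand])))
      = (substrings.dedup.filter (fun l => decide (l ∉ c))).filter
          (fun l => decide (l ≠ cand)) := by
    rw [List.filter_filter]
    apply List.filter_congr
    intro x _
    by_cases h1 : x ∈ c <;> by_cases h2 : x = cand <;> simp [h1, h2]
  rw [hsplit]
  have hin : cand ∈ substrings.dedup.filter (fun l => decide (l ∉ c)) := by
    rw [List.mem_filter]
    exact ⟨List.mem_dedup.mpr hmem, by simpa using hnot⟩
  apply List.length_filter_lt_length_iff_exists.mpr
  exact ⟨cand, hin, by simp⟩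

theorem muPos_le (substrings : List (List Int)) (c : List (List Int)) :
    muPos substrings c ≤ substrings.length :=
  le_trans (List.length_filter_le _ _)
    (List.Sublist.length_le (List.dedup_sublist _))

-- ===== VERDICT (by name: the statement is the Claim_ definition above) =====
theorem add_non_overlapping_substrings_spec : Claim_equal_add_non_overlapping_substrings := by
  intro cip combos substrings _hdom hpre
  obtain ⟨hgood, -, -⟩ := hpre
  unfold Spec_add_non_overlapping_substrings
  unfold add_non_overlapping_substrings add_non_overlapping_substrings_alt
  obtain ⟨μ, hμ, hbd⟩ :
      ∃ μ : List (List Int) → Nat,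
        (∀ c ch, ch ∈ childrenB c substrings → μ ch < μ c) ∧
        (∀ c, μ c ≤ substrings.length) := by
    rcases hgood with hnd | hpos
    · refine ⟨fun c => substrings.length - pyStartIndex c substrings, ?_, ?_⟩
      · intro c ch hch
        have h1 := children_start substrings hnd c ch hch
        have h2 := start_lt_of_children_ne c substrings ch hch
        show substrings.length - pyStartIndex ch substrings
            < substrings.length - pyStartIndex c substrings
        omega
      · intro c; exact Nat.sub_le _ _
    · exact ⟨muPos substrings, muPos_lt substrings hpos, muPos_le substrings⟩
  have hbound : ((childrenB cip substrings).flatMap (Pfun substrings)).length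
      ≤ (substrings.length + 1) ^ (substrings.length + 2) := by
    have h1 := Pfun_len_mu substrings μ hμ hbd substrings.length cip (hbd cip)
    rw [Pfun_fix_mu substrings μ hμ hbd cip] at h1
    simp only [List.length_cons] at h1
    have h2 : (substrings.length + 1) ^ (substrings.length + 1)
        ≤ (substrings.length + 1) ^ (substrings.length + 2) :=
      Nat.pow_le_pow_right (by omega) (by omega)
    omega
  rw [loopA_eq, ← childrenB_eq, goB_eq_mu substrings μ hμ hbd _ _ _ hbound]
  congr 1
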